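-- pv_equiv track=rewrite | github.com/mathbeveridge/asm | stackset/lehmer.py | is_321_avoiding
-- ===== SOURCE A (Python) =====
-- def is_321_avoiding(code):
--     size = len(code)
--     for i in range(size-1):
--         for j in range(i+1,size):
--             if code[j] > 0:
--                 zeros = sum([1 for k in range(i+1,j) if code[k]==0])
--                 if code[j] < code[i] - zeros:
--                     return False
--
--     return True
-- ===== SOURCE B (Python) =====
-- def is_321_avoiding(code):
--     # One pass: a pair (i, j) violates iff code[j] > 0 and
--     # code[i] + Z[i+1] > code[j] + Z[j], where Z[k] = #zeros among code[:k].
--     # Keep the running maximum of code[i] + Z[i+1] over i seen so far.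
--     best = None
--     z = 0  # number of zeros among code[:j]
--     for c in code:
--         if c > 0 and best is not None and best > c + z:
--             return False
--         if c == 0:
--             z += 1
--         m = c + z
--         if best is None or m > best:
--             best = m
--     return True
-- ===== Notes on version B (the rewrite author's own statement) =====
-- stated objective: faster
-- what changed: Replaced the triple loop (all pairs plus an inner zero-count scan) by a single pass that tracks the zero prefix count and the running maximum of code[i] + zeros(code[:i+1]), using the identity code[j] < code[i] - zeros_between iff code[i] + Z[i+1] > code[j] + Z[j].
import Mathlib
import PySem

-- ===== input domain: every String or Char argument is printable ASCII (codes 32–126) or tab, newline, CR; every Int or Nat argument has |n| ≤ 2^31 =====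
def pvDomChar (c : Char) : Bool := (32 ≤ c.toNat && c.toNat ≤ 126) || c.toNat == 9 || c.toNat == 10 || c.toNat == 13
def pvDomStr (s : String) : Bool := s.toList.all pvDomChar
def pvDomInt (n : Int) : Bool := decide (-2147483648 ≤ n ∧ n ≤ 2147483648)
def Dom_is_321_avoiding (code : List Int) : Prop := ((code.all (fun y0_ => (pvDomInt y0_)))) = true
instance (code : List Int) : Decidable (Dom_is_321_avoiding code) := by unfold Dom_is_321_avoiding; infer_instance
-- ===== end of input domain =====

-- B replaces A's triple loop by a single pass tracking the zero-prefix count and a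
-- running maximum of code[i] + zeros(code[:i+1]) (objective: faster, O(n) vs O(n^3)).

-- ===== PORT A =====
-- zeros = sum([1 for k in range(i+1,j) if code[k]==0])
def pvAzeros (code : List Int) (i j : Int) : Int :=
  (PySem.List.pyRange (i+1) j 1).foldl
    (fun acc k => if PySem.List.pyGetD code k 0 = 0 then acc + 1 else acc) 0

-- inner loop 'for j in range(i+1,size)' with early return False
def pvAinner (code : List Int) (i : Int) : List Int → Bool
  | [] => true
  | j :: js =>
    if PySem.List.pyGetD code j 0 > 0 then
      if PySem.List.pyGetD code j 0 < PySem.List.pyGetD code i 0 - pvAzeros code i j then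
        false
      else pvAinner code i js
    else pvAinner code i js

-- outer loop 'for i in range(size-1)'
def pvAouter (code : List Int) : List Int → Bool
  | [] => true
  | i :: is =>
    if pvAinner code i (PySem.List.pyRange (i+1) (code.length : Int) 1) then
      pvAouter code is
    else false

def is_321_avoiding (code : List Int) : Bool :=
  pvAouter code (PySem.List.pyRange 0 ((code.length : Int) - 1) 1)

-- ===== PORT B =====
-- 'best is not None and best > x'
def pvBcheck (best : Option Int) (x : Int) : Bool :=
  match best with
  | some b => decide (b > x)
  | none => false

-- the single pass of Source B, state (best, z)
def pvBgo : List Int → Option Int → Int → Bool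
  | [], _, _ => true
  | c :: rest, best, z =>
    if c > 0 && pvBcheck best (c + z) then false
    else
      let z' := if c = 0 then z + 1 else z
      let m := c + z'
      let best' := match best with
        | none => some m
        | some b => if m > b then some m else some b
      pvBgo rest best' z'

def is_321_avoiding_alt (code : List Int) : Bool := pvBgo code none 0

-- ===== PRECONDITION & SPEC =====
def Spec_is_321_avoiding (code : List Int) (out : Bool) : Prop := out = is_321_avoiding_alt code
instance (code : List Int) (out : Bool) : Decidable (Spec_is_321_avoiding code out) := by unfold Spec_is_321_avoiding; infer_instance

-- ===== CLAIM (what is proved, stated in full; the proofs are below) =====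
def Claim_equal_is_321_avoiding : Prop := ∀ (code : List Int), Dom_is_321_avoiding code → Spec_is_321_avoiding code (is_321_avoiding code)

-- ===== LEMMAS AND PROOFS =====

-- Z[k] = number of zeros among code[:k]
def pvZ (code : List Int) (k : Nat) : Int := ((code.take k).countP (fun c => c == 0) : Int)

def pvMark (code : List Int) (i : Nat) : Int := code.getD i 0 + pvZ code (i + 1)

-- the violation predicate both programs test, in prefix-sum form
def pvViol (code : List Int) (i j : Nat) : Prop :=
  0 < code.getD j 0 ∧ code.getD j 0 + pvZ code j < pvMark code i

theorem pvZ_succ (code : List Int) (k : Nat) (h : k < code.length) :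
    pvZ code (k + 1) = pvZ code k + (if code.getD k 0 = 0 then 1 else 0) := by
  have hg : code.getD k 0 = code[k] := by simp [List.getD, List.getElem?_eq_getElem h]
  rw [pvZ, pvZ, List.take_add_one, List.getElem?_eq_getElem h]
  simp only [Option.toList_some, List.countP_append, List.countP_cons, List.countP_nil]
  rw [hg] at *
  push_cast
  split_ifs with h1 h2 h2 <;> simp_all <;> omega

theorem pvAzeros_eq (code : List Int) (p q : Nat) (hq : q ≤ code.length) (hpq : p ≤ q) :
    pvAzeros code ((p : Int) - 1) (q : Int) = pvZ code q - pvZ code p := by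
  induction q, hpq using Nat.le_induction with
  | base =>
    simp [pvAzeros, PySem.List.pyRange_one_eq_nil (by omega : (p:Int) ≤ (p:Int)-1+1)]
  | succ q hpq ih =>
    have hq' : q < code.length := by omega
    have hcast : ((q + 1 : Nat) : Int) = (q : Int) + 1 := by push_cast; ring
    rw [pvAzeros, hcast,
      PySem.List.pyRange_one_succ_right (by omega : (p:Int) - 1 + 1 ≤ (q:Int)),
      List.foldl_append]
    have ihe : (PySem.List.pyRange ((p:Int)-1+1) (q:Int) 1).foldl
        (fun acc k => if PySem.List.pyGetD code k 0 = 0 then acc + 1 else acc) 0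
        = pvZ code q - pvZ code p := by
      have := ih (by omega)
      simpa [pvAzeros] using this
    rw [ihe, pvZ_succ code q hq']
    simp only [List.foldl_cons, List.foldl_nil, PySem.List.pyGetD_natCast]
    split_ifs <;> omega

-- A's inner loop returns true iff no j in the list violates
theorem pvAinner_iff (code : List Int) (i : Int) (l : List Int) :
    pvAinner code i l = true ↔
      ∀ j ∈ l, ¬ (0 < PySem.List.pyGetD code j 0 ∧
        PySem.List.pyGetD code j 0 < PySem.List.pyGetD code i 0 - pvAzeros code i j) := by
  induction l with
  | nil => simp [pvAinner]
  | cons j js ih =>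
    rw [pvAinner]
    split_ifs with h1 h2
    · simp only [Bool.false_eq_true, false_iff]
      intro hall
      exact hall j List.mem_cons_self ⟨h1, h2⟩
    · rw [ih]
      constructor
      · intro hall k hk
        rcases List.mem_cons.mp hk with rfl | hk
        · intro ⟨_, hlt⟩; exact h2 hlt
        · exact hall k hk
      · intro hall k hk; exact hall k (List.mem_cons_of_mem _ hk)
    · rw [ih]
      constructor
      · intro hall k hk
        rcases List.mem_cons.mp hk with rfl | hk
        · intro ⟨hp, _⟩; exact h1 hp
        · exact hall k hk
      · intro hall k hk; exact hall k (List.mem_cons_of_mem _ hk)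

theorem pvAouter_iff (code : List Int) (l : List Int) :
    pvAouter code l = true ↔
      ∀ i ∈ l, pvAinner code i (PySem.List.pyRange (i+1) (code.length : Int) 1) = true := by
  induction l with
  | nil => simp [pvAouter]
  | cons i is ih =>
    rw [pvAouter]
    split_ifs with h
    · rw [ih]
      constructor
      · intro hall k hk
        rcases List.mem_cons.mp hk with rfl | hk
        · exact h
        · exact hall k hk
      · intro hall k hk; exact hall k (List.mem_cons_of_mem _ hk)
    · simp only [Bool.false_eq_true, false_iff]
      intro hall
      exact h (hall i List.mem_cons_self)

theorem pvCond_iff (code : List Int) (i j : Nat) (hij : i < j) (hj : j < code.length) :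
    (0 < PySem.List.pyGetD code (j : Int) 0 ∧
      PySem.List.pyGetD code (j : Int) 0 <
        PySem.List.pyGetD code (i : Int) 0 - pvAzeros code (i : Int) (j : Int)) ↔
    pvViol code i j := by
  have hz : pvAzeros code (i : Int) (j : Int) = pvZ code j - pvZ code (i + 1) := by
    have h := pvAzeros_eq code (i + 1) j hj.le (by omega)
    have hc : ((i + 1 : Nat) : Int) - 1 = (i : Int) := by push_cast; ring
    rw [hc] at h
    exact h
  rw [hz]
  simp only [PySem.List.pyGetD_natCast]
  unfold pvViol pvMark
  omega

-- A = true iff no pair (i, j) violates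
theorem pvA_iff (code : List Int) :
    is_321_avoiding code = true ↔
      ∀ j, j < code.length → ∀ i, i < j → ¬ pvViol code i j := by
  rw [is_321_avoiding, pvAouter_iff]
  constructor
  · intro hall j hj i hij
    have hi : (i : Int) ∈ PySem.List.pyRange 0 ((code.length : Int) - 1) 1 := by
      rw [PySem.List.mem_pyRange_one]; omega
    have := (pvAinner_iff code (i:Int) _).mp (hall _ hi) (j : Int)
      (by rw [PySem.List.mem_pyRange_one]; omega)
    rw [pvCond_iff code i j hij hj] at this
    exact this
  · intro hall i hi
    rw [pvAinner_iff]
    intro j hjmem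
    rw [PySem.List.mem_pyRange_one] at hi hjmem
    have h0i : 0 ≤ i := hi.1
    have h0j : 0 ≤ j := by omega
    have hi' : i = ((i.toNat : Nat) : Int) := by omega
    have hj' : j = ((j.toNat : Nat) : Int) := by omega
    rw [hi', hj']
    rw [pvCond_iff code i.toNat j.toNat (by omega) (by omega)]
    exact hall j.toNat (by omega) i.toNat (by omega)

-- running maximum of pvMark over i < k, as B maintains it
def pvBest (code : List Int) : Nat → Option Int
  | 0 => none
  | k + 1 =>
    match pvBest code k with
    | none => some (pvMark code k)
    | some b => if pvMark code k > b then some (pvMark code k) else some b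

theorem pvBcheck_iff (code : List Int) (k : Nat) (x : Int) :
    pvBcheck (pvBest code k) x = true ↔ ∃ i, i < k ∧ x < pvMark code i := by
  induction k with
  | zero => simp [pvBest, pvBcheck]
  | succ k ih =>
    cases hb : pvBest code k with
    | none =>
      rw [hb] at ih
      simp only [pvBcheck] at ih
      have hno : ¬ ∃ i, i < k ∧ x < pvMark code i := by
        intro hh
        have := ih.mpr hh
        simp at this
      simp only [pvBest, hb, pvBcheck, decide_eq_true_eq]
      constructor
      · intro h; exact ⟨k, by omega, h⟩
      · rintro ⟨i, hik, hx⟩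
        rcases Nat.lt_succ_iff_lt_or_eq.mp hik with h | rfl
        · exact absurd ⟨i, h, hx⟩ hno
        · exact hx
    | some b =>
      rw [hb] at ih
      simp only [pvBcheck, decide_eq_true_eq] at ih
      simp only [pvBest, hb]
      split_ifs with hm
      · simp only [pvBcheck, decide_eq_true_eq]
        constructor
        · intro h; exact ⟨k, by omega, h⟩
        · rintro ⟨i, hik, hx⟩
          rcases Nat.lt_succ_iff_lt_or_eq.mp hik with h | rfl
          · have := ih.mpr ⟨i, h, hx⟩; omega
          · exact hx
      · simp only [pvBcheck, decide_eq_true_eq]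
        constructor
        · intro h
          obtain ⟨i, hik, hx⟩ := ih.mp h
          exact ⟨i, by omega, hx⟩
        · rintro ⟨i, hik, hx⟩
          rcases Nat.lt_succ_iff_lt_or_eq.mp hik with h | rfl
          · exact ih.mpr ⟨i, h, hx⟩
          · omega

theorem pvGetD_append_mid (pre rest : List Int) (c : Int) :
    (pre ++ c :: rest).getD pre.length 0 = c := by
  simp [List.getD, List.getElem?_append_right (le_refl pre.length)]

theorem pvBgo_iff (code : List Int) :
    ∀ (rest pre : List Int), code = pre ++ rest →
      (pvBgo rest (pvBest code pre.length) (pvZ code pre.length) = true ↔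
        ∀ j, pre.length ≤ j → j < code.length →
          ¬ (0 < code.getD j 0 ∧ ∃ i, i < j ∧ code.getD j 0 + pvZ code j < pvMark code i)) := by
  intro rest
  induction rest with
  | nil =>
    intro pre hcode
    subst hcode
    simp only [pvBgo, List.append_nil, true_iff]
    intro j h1 h2
    omega
  | cons c rest ih =>
    intro pre hcode
    have hk : pre.length < code.length := by
      rw [hcode, List.length_append, List.length_cons]; omega
    have hc : code.getD pre.length 0 = c := by
      rw [hcode]; exact pvGetD_append_mid pre rest c
    simp only [pvBgo]
    by_cases hguard :
        (decide (c > 0) && pvBcheck (pvBest code pre.length) (c + pvZ code pre.length)) = true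
    · rw [if_pos hguard]
      simp only [Bool.false_eq_true, false_iff]
      intro hall
      rw [Bool.and_eq_true, decide_eq_true_eq] at hguard
      obtain ⟨hcpos, hchk⟩ := hguard
      obtain ⟨i, hik, hx⟩ := (pvBcheck_iff code pre.length _).mp hchk
      exact hall pre.length (le_refl _) hk
        ⟨by rw [hc]; exact hcpos, i, hik, by rw [hc]; exact hx⟩
    · rw [if_neg hguard]
      have hz' : (if c = 0 then pvZ code pre.length + 1 else pvZ code pre.length)
          = pvZ code (pre.length + 1) := by
        rw [pvZ_succ code pre.length hk, hc]
        split_ifs <;> omega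
      rw [hz']
      have hb' : (match pvBest code pre.length with
          | none => some (c + pvZ code (pre.length + 1))
          | some b => if c + pvZ code (pre.length + 1) > b
              then some (c + pvZ code (pre.length + 1)) else some b)
          = pvBest code (pre.length + 1) := by
        have hm : c + pvZ code (pre.length + 1) = pvMark code pre.length := by
          unfold pvMark; rw [hc]
        rw [pvBest, hm]
      rw [hb']
      have hcode' : code = (pre ++ [c]) ++ rest := by
        rw [hcode, List.append_assoc]; rfl
      have ihh := ih (pre ++ [c]) hcode'
      rw [List.length_append, List.length_cons, List.length_nil] at ihh
      rw [ihh]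
      have hnv : ¬ (0 < code.getD pre.length 0 ∧ ∃ i, i < pre.length ∧
          code.getD pre.length 0 + pvZ code pre.length < pvMark code i) := by
        rw [hc]
        rintro ⟨hpos, hex⟩
        exact hguard (by
          rw [Bool.and_eq_true, decide_eq_true_eq]
          exact ⟨hpos, (pvBcheck_iff code pre.length _).mpr hex⟩)
      constructor
      · intro hall j h1 h2
        rcases Nat.lt_or_ge pre.length j with h | h
        · exact hall j (by omega) h2
        · have hj : j = pre.length := by omega
          subst hj
          exact hnv
      · intro hall j h1 h2
        exact hall j (by omega) h2

theorem pvB_iff (code : List Int) :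
    is_321_avoiding_alt code = true ↔
      ∀ j, j < code.length →
        ¬ (0 < code.getD j 0 ∧ ∃ i, i < j ∧ code.getD j 0 + pvZ code j < pvMark code i) := by
  have h := pvBgo_iff code code [] rfl
  simp only [List.length_nil] at h
  rw [show pvBest code 0 = none from rfl, show pvZ code 0 = (0 : Int) from rfl] at h
  rw [is_321_avoiding_alt, h]
  constructor
  · intro hh j hj; exact hh j (by omega) hj
  · intro hh j _ hj; exact hh j hj

-- ===== VERDICT (by name: the statement is the Claim_ definition above) =====
theorem is_321_avoiding_spec : Claim_equal_is_321_avoiding := by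
  intro code _
  unfold Spec_is_321_avoiding
  have hA := pvA_iff code
  have hB := pvB_iff code
  have key : (∀ j, j < code.length → ∀ i, i < j → ¬ pvViol code i j) ↔
      (∀ j, j < code.length →
        ¬ (0 < code.getD j 0 ∧ ∃ i, i < j ∧ code.getD j 0 + pvZ code j < pvMark code i)) := by
    constructor
    · rintro h j hj ⟨hpos, i, hij, hx⟩
      exact h j hj i hij ⟨hpos, hx⟩
    · rintro h j hj i hij ⟨hpos, hx⟩
      exact h j hj ⟨hpos, i, hij, hx⟩
  cases ha : is_321_avoiding code <;> cases hb : is_321_avoiding_alt code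
  · rfl
  · exact absurd (hA.mpr (key.mpr (hB.mp hb))) (by simp [ha])
  · exact absurd (hB.mpr (key.mp (hA.mp ha))) (by simp [hb])
  · rfl
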